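-- pv_equiv track=rewrite | github.com/SheldonHH/RustMap | scaffolding_py_tools/integrated_dependency_builder.py | process_relationships
-- ===== SOURCE A (Python) =====
-- def process_relationships(variable_relationship, new_function_labels):
--     revised_var_to_fn, fn_to_vars = {}, {}
--     for var, funcs in variable_relationship.items():
--         if var not in revised_var_to_fn:
--             revised_var_to_fn[var] = []
--         for func in funcs:
--             func_label = new_function_labels.get(func, func)
--             revised_var_to_fn[var].append(func_label)
--
--             if func_label not in fn_to_vars:
--                 fn_to_vars[func_label] = []
--             fn_to_vars[func_label].append(var)
--
--     return revised_var_to_fn, fn_to_vars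
-- ===== SOURCE B (Python) =====
-- def process_relationships(variable_relationship, new_function_labels):
--     # Flatten everything once into a (var, label) edge list, then build each
--     # map by grouping the edge list: forward map by var, reverse map by label.
--     edges = [(var, new_function_labels.get(f, f))
--              for var, funcs in variable_relationship.items() for f in funcs]
--     revised_var_to_fn = {var: [lbl for v, lbl in edges if v == var]
--                          for var in variable_relationship}
--     fn_to_vars = {lbl: [v for v, l in edges if l == lbl]
--                   for lbl in dict.fromkeys(l for _, l in edges)}
--     return revised_var_to_fn, fn_to_vars
-- ===== Notes on version B (the rewrite author's own statement) =====
-- stated objective: alternative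
-- what changed: Replaces A's single interleaved loop that grows both dicts incrementally with a flatten-then-group algorithm: one flat (var, label) edge list built once, then each map produced by a grouping comprehension (forward map grouped by var over the input keys, reverse map grouped by label over the first-occurrence-deduped labels); the Lean Pre_ additionally restricts the association-list encoding of the dict argument to unique keys, the only lists that actually represent a Python dict.
import Mathlib
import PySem

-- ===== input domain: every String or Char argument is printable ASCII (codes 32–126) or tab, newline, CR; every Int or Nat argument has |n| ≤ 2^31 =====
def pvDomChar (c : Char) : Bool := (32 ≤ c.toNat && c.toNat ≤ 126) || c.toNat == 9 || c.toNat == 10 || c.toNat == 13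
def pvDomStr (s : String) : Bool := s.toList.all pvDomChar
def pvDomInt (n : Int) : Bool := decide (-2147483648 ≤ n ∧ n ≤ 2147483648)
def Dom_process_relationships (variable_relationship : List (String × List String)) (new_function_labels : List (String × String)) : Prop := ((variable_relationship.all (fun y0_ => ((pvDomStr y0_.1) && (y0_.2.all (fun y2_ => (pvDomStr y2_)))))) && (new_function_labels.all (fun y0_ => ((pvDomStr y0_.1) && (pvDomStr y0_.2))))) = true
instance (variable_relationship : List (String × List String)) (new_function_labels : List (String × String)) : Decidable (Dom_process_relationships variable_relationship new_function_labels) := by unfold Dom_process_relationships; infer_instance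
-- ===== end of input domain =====

-- B abandons A's incremental two-dict loop for a flatten-then-group algorithm: one flat
-- (var, label) edge list, from which each map is obtained by grouping (filter per key).
-- Objective: alternative algorithm of similar size; not faster.

-- shared helper: new_function_labels.get(func, func)
def pvLbl (new_function_labels : List (String × String)) (func : String) : String :=
  (PySem.Dict.mk new_function_labels).getD func func

-- ===== PORT A =====
-- one interleaved loop: for var, funcs: init revised[var]; for func: label it, append to
-- revised[var], init-and-append fn_to_vars[func_label]
def process_relationships (variable_relationship : List (String × List String)) (new_function_labels : List (String × String)) : (List (String × List String)) × (List (String × List String)) :=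
  let st := variable_relationship.foldl
    (fun (st : PySem.Dict String (List String) × PySem.Dict String (List String)) vf =>
      vf.2.foldl
        (fun st2 func =>
          (st2.1.modify vf.1 [] (fun l => l ++ [pvLbl new_function_labels func]),
           (if st2.2.contains (pvLbl new_function_labels func) then st2.2
            else st2.2.insert (pvLbl new_function_labels func) []).modify
             (pvLbl new_function_labels func) [] (fun l => l ++ [vf.1])))
        ((if st.1.contains vf.1 then st.1 else st.1.insert vf.1 []), st.2))
    (PySem.Dict.empty, PySem.Dict.empty)
  (st.1.items, st.2.items)

-- ===== PORT B =====
-- flatten to an edge list, then build each dict by a grouping comprehension: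
-- forward map grouped by var (over the input's keys), reverse map grouped by label
-- (over the first-occurrence-deduped labels, dict.fromkeys = PySem.List.dedup)
def process_relationships_alt (variable_relationship : List (String × List String)) (new_function_labels : List (String × String)) : (List (String × List String)) × (List (String × List String)) :=
  let edges := variable_relationship.flatMap
    (fun vf => vf.2.map (fun f => (vf.1, pvLbl new_function_labels f)))
  let revised := (variable_relationship.map Prod.fst).map
    (fun v => (v, (edges.filter (fun e => e.1 == v)).map Prod.snd))
  let fn := (PySem.List.dedup (edges.map Prod.snd)).map
    (fun lbl => (lbl, (edges.filter (fun e => e.2 == lbl)).map Prod.fst))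
  (revised, fn)

-- ===== PRECONDITION & SPEC =====
-- Pre_ excludes association lists with duplicate variable keys: the first argument encodes a
-- Python dict, whose keys are unique, so such lists never arise as an argument of the Python A;
-- on them the two dict accumulations are both accidental.
def Pre_process_relationships (variable_relationship : List (String × List String)) (new_function_labels : List (String × String)) : Prop :=
  (variable_relationship.map Prod.fst).Nodup
instance (variable_relationship : List (String × List String)) (new_function_labels : List (String × String)) : Decidable (Pre_process_relationships variable_relationship new_function_labels) := by unfold Pre_process_relationships; infer_instance
def pvWitness_process_relationships : (List (String × List String)) × (List (String × String)) :=
  ([("x", ["f", "g"]), ("y", ["f"])], [("f", "F")])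

def Spec_process_relationships (variable_relationship : List (String × List String)) (new_function_labels : List (String × String)) (out : (List (String × List String)) × (List (String × List String))) : Prop := out = process_relationships_alt variable_relationship new_function_labels
instance (variable_relationship : List (String × List String)) (new_function_labels : List (String × String)) (out : (List (String × List String)) × (List (String × List String))) : Decidable (Spec_process_relationships variable_relationship new_function_labels out) := by unfold Spec_process_relationships; infer_instance

-- ===== CLAIM (what is proved, stated in full; the proofs are below) =====
def Claim_equal_process_relationships : Prop := ∀ (variable_relationship : List (String × List String)) (new_function_labels : List (String × String)), Dom_process_relationships variable_relationship new_function_labels → Pre_process_relationships variable_relationship new_function_labels → Spec_process_relationships variable_relationship new_function_labels (process_relationships variable_relationship new_function_labels)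

-- ===== LEMMAS AND PROOFS =====

-- `modify` right after an `insert` at the same key rewrites the inserted value in place.
theorem pv_insert_modify {ν : Type} (d : PySem.Dict String ν) (k : String) (v : ν) (dflt : ν) (f : ν → ν) :
    (d.insert k v).modify k dflt f = d.insert k (f v) := by
  simp [PySem.Dict.modify, PySem.Dict.getD_insert_self, PySem.Dict.insert_insert_self]

-- A's inner appends to revised[var] accumulate the mapped labels.
theorem pv_rfold (nfl : List (String × String)) (var : String) (funcs : List String) :
    ∀ (R : PySem.Dict String (List String)) (l : List String),
      funcs.foldl (fun r f => r.modify var [] (fun xs => xs ++ [pvLbl nfl f])) (R.insert var l)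
        = R.insert var (l ++ funcs.map (pvLbl nfl)) := by
  induction funcs with
  | nil => intro R l; simp
  | cons f fs ih =>
      intro R l
      simp only [List.foldl_cons, pv_insert_modify, List.map_cons]
      rw [ih R (l ++ [pvLbl nfl f])]
      simp

-- A's guarded init-then-append on fn_to_vars is exactly a `modify` (a new key appends).
theorem pv_step_modify (d : PySem.Dict String (List String)) (label var : String) :
    (if d.contains label then d else d.insert label []).modify label [] (fun l => l ++ [var])
      = d.modify label [] (fun l => l ++ [var]) := by
  by_cases h : d.contains label = true
  · simp [h]
  · simp only [Bool.not_eq_true] at h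
    simp [h, PySem.Dict.modify, PySem.Dict.getD_of_not_contains d [] h,
      PySem.Dict.insert_insert_self]

-- clean-shape induction: the interleaved fold with unconditional modify splits in two
theorem pv_main_clean (nfl : List (String × String)) (vr : List (String × List String)) :
    ∀ (R F : PySem.Dict String (List String)),
      (∀ vf ∈ vr, R.contains vf.1 = false) → (vr.map Prod.fst).Nodup →
      vr.foldl
        (fun (st : PySem.Dict String (List String) × PySem.Dict String (List String)) vf =>
          vf.2.foldl
            (fun st2 func =>
              (st2.1.modify vf.1 [] (fun l => l ++ [pvLbl nfl func]),
               st2.2.modify (pvLbl nfl func) [] (fun l => l ++ [vf.1])))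
            ((if st.1.contains vf.1 then st.1 else st.1.insert vf.1 []), st.2))
        (R, F)
      = (vr.foldl (fun d vf => d.insert vf.1 (vf.2.map (pvLbl nfl))) R,
         vr.foldl (fun d vf =>
           vf.2.foldl
             (fun d func => d.modify (pvLbl nfl func) [] (fun l => l ++ [vf.1])) d) F) := by
  induction vr with
  | nil => intro R F _ _; rfl
  | cons vf vfs ih =>
      intro R F hfresh hnd
      have hR : R.contains vf.1 = false := hfresh vf (List.mem_cons_self)
      simp only [List.foldl_cons, hR, Bool.false_eq_true, if_false]
      rw [PySem.List.foldl_prod_mk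
        (fun (r : PySem.Dict String (List String)) (func : String) =>
          r.modify vf.1 [] (fun l => l ++ [pvLbl nfl func]))
        (fun (F2 : PySem.Dict String (List String)) (func : String) =>
          F2.modify (pvLbl nfl func) [] (fun l => l ++ [vf.1]))]
      rw [pv_rfold nfl vf.1 vf.2 R []]
      simp only [List.nil_append]
      apply ih
      · intro vf' hmem
        rw [PySem.Dict.contains_insert]
        have h1 : vf'.1 ≠ vf.1 := by
          intro hEq
          have : vf.1 ∈ vfs.map Prod.fst := hEq ▸ List.mem_map_of_mem hmem
          simp only [List.map_cons, List.nodup_cons] at hnd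
          exact hnd.1 this
        simp [h1, hfresh vf' (List.mem_cons_of_mem _ hmem)]
      · simp only [List.map_cons, List.nodup_cons] at hnd
        exact hnd.2

-- Main invariant: on a fresh, duplicate-free prefix A's interleaved fold computes exactly
-- a pair of independent folds: an insert-per-var fold and a modify-append fold over labels.
theorem pv_main (nfl : List (String × String)) (vr : List (String × List String)) :
    ∀ (R F : PySem.Dict String (List String)),
      (∀ vf ∈ vr, R.contains vf.1 = false) → (vr.map Prod.fst).Nodup →
      vr.foldl
        (fun (st : PySem.Dict String (List String) × PySem.Dict String (List String)) vf =>
          vf.2.foldl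
            (fun st2 func =>
              (st2.1.modify vf.1 [] (fun l => l ++ [pvLbl nfl func]),
               (if st2.2.contains (pvLbl nfl func) then st2.2
                else st2.2.insert (pvLbl nfl func) []).modify
                 (pvLbl nfl func) [] (fun l => l ++ [vf.1])))
            ((if st.1.contains vf.1 then st.1 else st.1.insert vf.1 []), st.2))
        (R, F)
      = (vr.foldl (fun d vf => d.insert vf.1 (vf.2.map (pvLbl nfl))) R,
         vr.foldl (fun d vf =>
           vf.2.foldl
             (fun d func => d.modify (pvLbl nfl func) [] (fun l => l ++ [vf.1])) d) F) := by
  intro R F hfresh hnd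
  simp only [pv_step_modify]
  exact pv_main_clean nfl vr R F hfresh hnd

-- the edge list B flattens to
def pvEdges (nfl : List (String × String)) (vr : List (String × List String)) : List (String × String) :=
  vr.flatMap (fun vf => vf.2.map (fun f => (vf.1, pvLbl nfl f)))

-- no edge carries a var absent from the keys
theorem pv_filter_edges_nil (nfl : List (String × String)) (vr : List (String × List String))
    (v : String) (hv : v ∉ vr.map Prod.fst) :
    (pvEdges nfl vr).filter (fun e => e.1 == v) = [] := by
  induction vr with
  | nil => rfl
  | cons vf vfs ih =>
      simp only [List.map_cons, List.mem_cons, not_or] at hv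
      simp only [pvEdges] at ih ⊢
      have hcomp : ((fun e : String × String => e.1 == v) ∘ (fun f => (vf.1, pvLbl nfl f)))
           = fun _ => false := by
        funext f; simp [Ne.symm hv.1]
      rw [List.flatMap_cons, List.filter_append, List.filter_map, hcomp, ih hv.2]
      simp

-- with unique keys, filtering the edge list at a key yields exactly that key's block
theorem pv_filter_edges (nfl : List (String × String)) (vr : List (String × List String))
    (hnd : (vr.map Prod.fst).Nodup) :
    ∀ vf ∈ vr, (pvEdges nfl vr).filter (fun e => e.1 == vf.1)
      = vf.2.map (fun f => (vf.1, pvLbl nfl f)) := by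
  induction vr with
  | nil => intro vf h; cases h
  | cons vg vfs ih =>
      simp only [List.map_cons, List.nodup_cons] at hnd
      intro vf hmem
      simp only [pvEdges] at ih ⊢
      rcases List.mem_cons.mp hmem with h | h
      · subst h
        have hnil : (vfs.flatMap (fun vf => vf.2.map (fun f => (vf.1, pvLbl nfl f)))).filter
            (fun e => e.1 == vf.1) = [] := pv_filter_edges_nil nfl vfs vf.1 hnd.1
        have hcomp : (fun e : String × String => e.1 == vf.1) ∘ (fun f => (vf.1, pvLbl nfl f))
             = fun _ => true := by funext f; simp
        rw [List.flatMap_cons, List.filter_append, List.filter_map, hcomp, hnil,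
          List.filter_true, List.append_nil]
      · have h1 : vg.1 ≠ vf.1 := by
          intro hEq
          exact hnd.1 (hEq ▸ List.mem_map_of_mem h)
        have hcomp : (fun e : String × String => e.1 == vf.1) ∘ (fun f => (vg.1, pvLbl nfl f))
             = fun _ => false := by funext f; simp [h1]
        rw [List.flatMap_cons, List.filter_append, List.filter_map, hcomp, ih hnd.2 vf h]
        simp

-- A's revised dict: fresh distinct inserts append, so its items list is the mapped input.
theorem pv_revised_items (nfl : List (String × String)) (vr : List (String × List String))
    (hnd : (vr.map Prod.fst).Nodup) :
    (vr.foldl (fun (d : PySem.Dict String (List String)) vf =>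
        d.insert vf.1 (vf.2.map (pvLbl nfl))) PySem.Dict.empty).items
      = vr.map (fun vf => (vf.1, vf.2.map (pvLbl nfl))) := by
  rw [PySem.Dict.items_foldl_insert_fresh vr Prod.fst
        (fun vf => vf.2.map (pvLbl nfl)) PySem.Dict.empty
        (by intro a _; simp [PySem.Dict.contains_empty]) hnd]
  rfl

-- A's fn_to_vars nested fold is a single modify-append fold over the swapped edge list.
theorem pv_fn_flat (nfl : List (String × String)) (vr : List (String × List String)) :
    vr.foldl (fun (d : PySem.Dict String (List String)) vf =>
        vf.2.foldl
          (fun d func => d.modify (pvLbl nfl func) [] (fun l => l ++ [vf.1])) d)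
      PySem.Dict.empty
    = ((pvEdges nfl vr).map Prod.swap).foldl
        (fun d p => d.modify p.1 [] (fun l => l ++ [p.2])) PySem.Dict.empty := by
  rw [List.foldl_map, pvEdges, List.foldl_flatMap]
  apply PySem.List.foldl_congr_mem
  intro d vf _
  rw [List.foldl_map]
  simp

-- the items of a modify-append grouping fold: deduped keys, each with its filtered group
theorem pv_group_items (Q : List (String × String)) :
    ((Q.foldl (fun (d : PySem.Dict String (List String)) p =>
        d.modify p.1 [] (fun l => l ++ [p.2])) PySem.Dict.empty).items)
      = (PySem.List.dedup (Q.map Prod.fst)).map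
          (fun k => (k, (Q.filter (fun p => p.1 == k)).map Prod.snd)) := by
  have hkeys : (Q.foldl (fun (d : PySem.Dict String (List String)) p =>
      d.modify p.1 [] (fun l => l ++ [p.2])) PySem.Dict.empty).keys
      = PySem.List.dedup (Q.map Prod.fst) := by
    rw [PySem.Dict.keys_foldl_modify_key]
    simp [PySem.Dict.keys_empty, PySem.List.dedup_eq_ofList]
    rfl
  have hnd : (Q.foldl (fun (d : PySem.Dict String (List String)) p =>
      d.modify p.1 [] (fun l => l ++ [p.2])) PySem.Dict.empty).keys.Nodup := by
    rw [hkeys]; exact PySem.List.nodup_dedup _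
  rw [PySem.Dict.items_eq_map_keys _ hnd [], hkeys]
  apply List.map_eq_map_iff.mpr
  intro k _
  rw [PySem.Dict.getD_foldl_modify_append]
  simp [PySem.Dict.getD_empty]

-- ===== VERDICT (by name: the statement is the Claim_ definition above) =====
theorem process_relationships_spec : Claim_equal_process_relationships := by
  intro vr nfl _ hpre
  simp only [Spec_process_relationships, process_relationships, process_relationships_alt]
  rw [pv_main nfl vr PySem.Dict.empty PySem.Dict.empty
    (by intro vf _; simp [PySem.Dict.contains_empty]) hpre]
  have hedges : vr.flatMap (fun vf => vf.2.map (fun f => (vf.1, pvLbl nfl f))) = pvEdges nfl vr := rfl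
  rw [hedges]
  refine Prod.ext ?_ ?_
  · -- revised component
    rw [pv_revised_items nfl vr hpre, List.map_map]
    symm
    apply List.map_eq_map_iff.mpr
    intro vf hmem
    simp only [Function.comp]
    rw [pv_filter_edges nfl vr hpre vf hmem, List.map_map]
    rfl
  · -- fn_to_vars component
    rw [pv_fn_flat nfl vr, pv_group_items]
    have h1 : ((pvEdges nfl vr).map Prod.swap).map Prod.fst = (pvEdges nfl vr).map Prod.snd := by
      rw [List.map_map]; rfl
    rw [h1]
    symm
    apply List.map_eq_map_iff.mpr
    intro k _
    rw [List.filter_map, List.map_map]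
    have h2 : (fun p : String × String => p.1 == k) ∘ Prod.swap = fun e : String × String => e.2 == k := rfl
    rw [h2]
    rfl
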